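-- pv_equiv track=rewrite | github.com/NaveedTechLab/Hackathon-4-Course-Companion-FTE- | phase-1/services/synthesis_service.py | _classify_connection_type
-- ===== SOURCE A (Python) =====
-- from typing import List, Dict, Any, Optional
--
-- def _classify_connection_type(common_elements: List[str]) -> str:
--     """
--     Classify the type of connection based on common elements
--     """
--     # Define connection type indicators
--     prerequisite_indicators = {
--         'depends', 'require', 'prerequisite', 'foundation', 'based on', 'building on',
--         'introduces', 'establishes', 'requires', 'needs', 'precedes'
--     }
--
--     complementary_indicators = {
--         'complements', 'supports', 'enhances', 'adds', 'extends', 'applies',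
--         'uses', 'implements', 'demonstrates', 'illustrates', 'shows'
--     }
--
--     analogous_indicators = {
--         'similar', 'like', 'resembles', 'compared to', 'analogy', 'parallel',
--         'equivalent', 'corresponds to', 'matches', 'resembles'
--     }
--
--     # Check for connection type indicators in common elements
--     common_set = {elem.lower() for elem in common_elements}
--
--     if common_set.intersection(prerequisite_indicators):
--         return "prerequisite"
--     elif common_set.intersection(complementary_indicators):
--         return "complementary"
--     elif common_set.intersection(analogous_indicators):
--         return "analogous"
--     else:
--         return "related"
-- ===== SOURCE B (Python) =====
-- _PRIORITY = {
--     'depends': 0, 'require': 0, 'prerequisite': 0, 'foundation': 0, 'based on': 0,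
--     'building on': 0, 'introduces': 0, 'establishes': 0, 'requires': 0, 'needs': 0,
--     'precedes': 0,
--     'complements': 1, 'supports': 1, 'enhances': 1, 'adds': 1, 'extends': 1,
--     'applies': 1, 'uses': 1, 'implements': 1, 'demonstrates': 1, 'illustrates': 1,
--     'shows': 1,
--     'similar': 2, 'like': 2, 'resembles': 2, 'compared to': 2, 'analogy': 2,
--     'parallel': 2, 'equivalent': 2, 'corresponds to': 2, 'matches': 2,
-- }
--
-- _NAMES = ("prerequisite", "complementary", "analogous")
--
--
-- def _classify_connection_type(common_elements):
--     """Single pass over common_elements keeping the best (lowest) category priority."""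
--     best = None
--     for elem in common_elements:
--         p = _PRIORITY.get(elem.lower())
--         if p is not None and (best is None or p < best):
--             best = p
--     if best is None:
--         return "related"
--     return _NAMES[best]
-- ===== Notes on version B (the rewrite author's own statement) =====
-- stated objective: alternative
-- what changed: Replaced A's three set intersections followed by an if/elif chain with one inverted keyword-to-priority dict and a single min-keeping pass over the elements.
import Mathlib
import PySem

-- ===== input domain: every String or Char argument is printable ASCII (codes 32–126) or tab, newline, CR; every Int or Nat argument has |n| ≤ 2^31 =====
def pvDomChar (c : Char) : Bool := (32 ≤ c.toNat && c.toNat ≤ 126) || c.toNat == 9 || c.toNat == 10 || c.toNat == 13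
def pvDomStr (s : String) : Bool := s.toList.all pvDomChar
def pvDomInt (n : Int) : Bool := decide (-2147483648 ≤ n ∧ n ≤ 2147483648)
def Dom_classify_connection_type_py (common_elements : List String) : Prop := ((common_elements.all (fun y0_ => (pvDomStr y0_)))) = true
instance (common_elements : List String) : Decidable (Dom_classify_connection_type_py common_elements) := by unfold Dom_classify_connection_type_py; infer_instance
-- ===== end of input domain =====

-- B replaces A's three set intersections + if/elif chain by one keyword→priority dict and a
-- single min-keeping pass over the elements (objective: alternative decomposition, same cost).

-- ===== PORT A =====
def prerequisite_indicators : PySem.Set String := PySem.Set.ofList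
  ["depends", "require", "prerequisite", "foundation", "based on", "building on",
   "introduces", "establishes", "requires", "needs", "precedes"]

def complementary_indicators : PySem.Set String := PySem.Set.ofList
  ["complements", "supports", "enhances", "adds", "extends", "applies",
   "uses", "implements", "demonstrates", "illustrates", "shows"]

def analogous_indicators : PySem.Set String := PySem.Set.ofList
  ["similar", "like", "resembles", "compared to", "analogy", "parallel",
   "equivalent", "corresponds to", "matches", "resembles"]

def classify_connection_type_py (common_elements : List String) : String :=
  let common_set : PySem.Set String := PySem.Set.ofList (common_elements.map PySem.Str.lower)
  if PySem.Set.inter common_set prerequisite_indicators ≠ [] then "prerequisite"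
  else if PySem.Set.inter common_set complementary_indicators ≠ [] then "complementary"
  else if PySem.Set.inter common_set analogous_indicators ≠ [] then "analogous"
  else "related"

-- ===== PORT B =====
def pvPriority : PySem.Dict String Int := PySem.Dict.ofList
  [("depends", 0), ("require", 0), ("prerequisite", 0), ("foundation", 0), ("based on", 0),
   ("building on", 0), ("introduces", 0), ("establishes", 0), ("requires", 0), ("needs", 0),
   ("precedes", 0),
   ("complements", 1), ("supports", 1), ("enhances", 1), ("adds", 1), ("extends", 1),
   ("applies", 1), ("uses", 1), ("implements", 1), ("demonstrates", 1), ("illustrates", 1),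
   ("shows", 1),
   ("similar", 2), ("like", 2), ("resembles", 2), ("compared to", 2), ("analogy", 2),
   ("parallel", 2), ("equivalent", 2), ("corresponds to", 2), ("matches", 2)]

-- loop body of B: keep the lowest priority seen so far
def pvBestStep (best : Option Int) (elem : String) : Option Int :=
  match pvPriority.get? (PySem.Str.lower elem) with
  | none => best
  | some p =>
    match best with
    | none => some p
    | some b => if p < b then some p else some b

def classify_connection_type_py_alt (common_elements : List String) : String :=
  match common_elements.foldl pvBestStep none with
  | none => "related"
  | some 0 => "prerequisite"
  | some 1 => "complementary"
  | _ => "analogous"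

-- ===== PRECONDITION & SPEC =====
def Spec_classify_connection_type_py (common_elements : List String) (out : String) : Prop := out = classify_connection_type_py_alt common_elements
instance (common_elements : List String) (out : String) : Decidable (Spec_classify_connection_type_py common_elements out) := by unfold Spec_classify_connection_type_py; infer_instance

-- ===== CLAIM (what is proved, stated in full; the proofs are below) =====
def Claim_equal_classify_connection_type_py : Prop := ∀ (common_elements : List String), Dom_classify_connection_type_py common_elements → Spec_classify_connection_type_py common_elements (classify_connection_type_py common_elements)

-- ===== LEMMAS AND PROOFS =====

-- option-valued min: what pvBestStep accumulates
def pvOmin (a b : Option Int) : Option Int :=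
  match a, b with
  | none, b => b
  | a, none => a
  | some x, some y => some (min x y)

def pvPrio (e : String) : Option Int := pvPriority.get? (PySem.Str.lower e)

lemma pvItems_eq : pvPriority.items =
  [("depends", 0), ("require", 0), ("prerequisite", 0), ("foundation", 0), ("based on", 0),
   ("building on", 0), ("introduces", 0), ("establishes", 0), ("requires", 0), ("needs", 0),
   ("precedes", 0),
   ("complements", 1), ("supports", 1), ("enhances", 1), ("adds", 1), ("extends", 1),
   ("applies", 1), ("uses", 1), ("implements", 1), ("demonstrates", 1), ("illustrates", 1),
   ("shows", 1),
   ("similar", 2), ("like", 2), ("resembles", 2), ("compared to", 2), ("analogy", 2),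
   ("parallel", 2), ("equivalent", 2), ("corresponds to", 2), ("matches", 2)] := by rfl

lemma pvBestStep_eq (best : Option Int) (e : String) :
    pvBestStep best e = pvOmin best (pvPrio e) := by
  unfold pvBestStep pvOmin pvPrio
  rcases pvPriority.get? (PySem.Str.lower e) with _ | p
  · cases best <;> rfl
  · rcases best with _ | b
    · rfl
    · by_cases h : p < b <;> simp [h, min_def]

lemma pvOmin_none_right (a : Option Int) : pvOmin a none = a := by cases a <;> rfl

lemma pvOmin_assoc (a b c : Option Int) : pvOmin (pvOmin a b) c = pvOmin a (pvOmin b c) := by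
  rcases a with _ | x <;> rcases b with _ | y <;> rcases c with _ | z <;>
    simp [pvOmin, min_assoc]

lemma foldl_bestStep (l : List String) : ∀ acc : Option Int,
    l.foldl pvBestStep acc = pvOmin acc (l.foldl pvBestStep none) := by
  induction l with
  | nil => intro acc; simp [pvOmin_none_right]
  | cons e l ih =>
    intro acc
    simp only [List.foldl_cons]
    rw [ih (pvBestStep acc e), ih (pvBestStep none e),
        pvBestStep_eq, pvBestStep_eq, pvOmin_assoc]
    rfl

-- every value stored in pvPriority is 0, 1 or 2
lemma pvPrio_cases (e : String) :
    pvPrio e = none ∨ pvPrio e = some 0 ∨ pvPrio e = some 1 ∨ pvPrio e = some 2 := by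
  unfold pvPrio
  rcases h : pvPriority.get? (PySem.Str.lower e) with _ | v
  · exact Or.inl rfl
  · have hm := PySem.Dict.mem_items_of_get?_eq_some _ h
    have h2 : v ∈ pvPriority.items.map Prod.snd := List.mem_map_of_mem hm
    rw [pvItems_eq] at h2
    simp at h2
    rcases h2 with rfl | rfl | rfl <;> simp

-- the boolean match conditions, one per category
def pvQ (k : Int) (e : String) : Bool := pvPrio e == some k

def pvCat (l : List String) : Option Int :=
  if l.any (pvQ 0) then some 0
  else if l.any (pvQ 1) then some 1
  else if l.any (pvQ 2) then some 2
  else none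

lemma foldl_eq_cat (l : List String) : l.foldl pvBestStep none = pvCat l := by
  induction l with
  | nil => rfl
  | cons e l ih =>
    simp only [List.foldl_cons]
    rw [foldl_bestStep, ih, pvBestStep_eq]
    show pvOmin (pvOmin none (pvPrio e)) (pvCat l) = pvCat (e :: l)
    rcases pvPrio_cases e with h | h | h | h <;>
      simp only [pvCat, List.any_cons, pvQ, h] <;>
      norm_num <;> split_ifs <;> simp [pvOmin]

lemma prio_iff0 (w : String) : pvPriority.get? w = some 0 ↔
    w ∈ ["depends", "require", "prerequisite", "foundation", "based on", "building on", "introduces", "establishes", "requires", "needs", "precedes"] := by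
  constructor
  · intro h
    have hm := PySem.Dict.mem_items_of_get?_eq_some _ h
    rw [pvItems_eq] at hm
    simp at hm
    simp
    tauto
  · intro h
    simp only [List.mem_cons, List.not_mem_nil, or_false] at h
    rcases h with rfl|rfl|rfl|rfl|rfl|rfl|rfl|rfl|rfl|rfl|rfl <;> rfl

lemma prio_iff1 (w : String) : pvPriority.get? w = some 1 ↔
    w ∈ ["complements", "supports", "enhances", "adds", "extends", "applies", "uses", "implements", "demonstrates", "illustrates", "shows"] := by
  constructor
  · intro h
    have hm := PySem.Dict.mem_items_of_get?_eq_some _ h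
    rw [pvItems_eq] at hm
    simp at hm
    simp
    tauto
  · intro h
    simp only [List.mem_cons, List.not_mem_nil, or_false] at h
    rcases h with rfl|rfl|rfl|rfl|rfl|rfl|rfl|rfl|rfl|rfl|rfl <;> rfl

lemma prio_iff2 (w : String) : pvPriority.get? w = some 2 ↔
    w ∈ ["similar", "like", "resembles", "compared to", "analogy", "parallel", "equivalent", "corresponds to", "matches", "resembles"] := by
  constructor
  · intro h
    have hm := PySem.Dict.mem_items_of_get?_eq_some _ h
    rw [pvItems_eq] at hm
    simp at hm
    simp
    tauto
  · intro h
    simp only [List.mem_cons, List.not_mem_nil, or_false] at h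
    rcases h with rfl|rfl|rfl|rfl|rfl|rfl|rfl|rfl|rfl|rfl <;> rfl

-- nonempty intersection ↔ some element matches
lemma inter_ne_nil (lows : List String) (S : PySem.Set String) :
    PySem.Set.inter (PySem.Set.ofList lows) S ≠ [] ↔ ∃ x ∈ lows, x ∈ S := by
  rw [Ne, List.eq_nil_iff_forall_not_mem]
  push Not
  simp [PySem.Set.mem_inter, PySem.Set.mem_ofList]

lemma condA_iff (ce : List String) (k : Int) (S : PySem.Set String) (L : List String)
    (hS : S = PySem.Set.ofList L)
    (hL : ∀ w, pvPriority.get? w = some k ↔ w ∈ L) :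
    PySem.Set.inter (PySem.Set.ofList (ce.map PySem.Str.lower)) S ≠ [] ↔ ce.any (pvQ k) = true := by
  rw [inter_ne_nil, hS]
  simp only [List.any_eq_true, pvQ, beq_iff_eq, pvPrio, List.mem_map,
    PySem.Set.mem_ofList, hL]
  constructor
  · rintro ⟨x, ⟨e, he, rfl⟩, hx⟩; exact ⟨e, he, hx⟩
  · rintro ⟨e, he, hx⟩; exact ⟨PySem.Str.lower e, ⟨e, he, rfl⟩, hx⟩

-- ===== VERDICT (by name: the statement is the Claim_ definition above) =====
theorem classify_connection_type_py_spec : Claim_equal_classify_connection_type_py := by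
  intro ce _
  unfold Spec_classify_connection_type_py
  unfold classify_connection_type_py classify_connection_type_py_alt
  rw [foldl_eq_cat]
  have h0 := condA_iff ce 0 prerequisite_indicators _ rfl prio_iff0
  have h1 := condA_iff ce 1 complementary_indicators _ rfl prio_iff1
  have h2 := condA_iff ce 2 analogous_indicators _ rfl prio_iff2
  simp only [pvCat]
  by_cases c0 : ce.any (pvQ 0) = true <;> by_cases c1 : ce.any (pvQ 1) = true <;>
    by_cases c2 : ce.any (pvQ 2) = true <;>
    simp [c0, c1, c2, h0, h1, h2]
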